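-- pv_equiv track=rewrite | github.com/andyElking/LevyGAN | src/evaluation/shuffle_prod.py | algebra_level_calculator
-- ===== SOURCE A (Python) =====
-- def algebra_level_calculator(sublevel: int, dim: int, level: int):
--     """
--     Given the sublevel, calculate the indices corresponding to such level in the vectorized element
--     """
--     assert sublevel <= level
--     idx_start = 0
--     idx_end = 1
--     for i in range(1,sublevel+1):
--         idx_start = idx_end
--         idx_end = idx_start + dim**i
--     return idx_start, idx_end
-- ===== SOURCE B (Python) =====
-- def algebra_level_calculator(sublevel: int, dim: int, level: int):
--     """Closed-form (geometric series) version: no loop."""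
--     assert sublevel <= level
--
--     def f(k):
--         # number of coordinates in levels 0..k of the tensor algebra
--         if dim == 1:
--             return 1 + k
--         return 1 + (dim ** (k + 1) - dim) // (dim - 1)
--
--     n = max(sublevel, 0)
--     return f(n - 1), f(n)
-- ===== Notes on version B (the rewrite author's own statement) =====
-- stated objective: faster
-- what changed: Replaced the accumulation loop over range(1, sublevel+1) by a closed-form geometric-series formula f(k) = 1+k if dim==1 else 1+(dim**(k+1)-dim)//(dim-1), returning (f(n-1), f(n)) with n = max(sublevel, 0).
import Mathlib
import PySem

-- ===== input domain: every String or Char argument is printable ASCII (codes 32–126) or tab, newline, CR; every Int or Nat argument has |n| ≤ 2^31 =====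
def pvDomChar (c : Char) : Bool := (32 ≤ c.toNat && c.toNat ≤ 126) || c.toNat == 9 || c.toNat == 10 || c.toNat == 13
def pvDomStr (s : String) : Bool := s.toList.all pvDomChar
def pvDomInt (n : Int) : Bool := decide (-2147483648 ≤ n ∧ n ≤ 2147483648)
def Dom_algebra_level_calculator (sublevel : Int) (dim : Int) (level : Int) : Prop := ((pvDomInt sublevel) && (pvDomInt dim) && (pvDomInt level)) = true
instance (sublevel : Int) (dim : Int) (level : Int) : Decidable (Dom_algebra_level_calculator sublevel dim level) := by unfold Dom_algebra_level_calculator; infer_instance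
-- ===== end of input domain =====

-- B replaces A's accumulation loop by the geometric-series closed form (simpler, loop-free).

-- ===== PORT A =====
-- for i in range(1, sublevel+1): idx_start = idx_end; idx_end = idx_start + dim**i
def algebra_level_calculator (sublevel : Int) (dim : Int) (level : Int) : Int × Int :=
  (PySem.List.pyRange 1 (sublevel + 1) 1).foldl
    (fun (s : Int × Int) (i : Int) => (s.2, s.2 + dim ^ i.toNat)) (0, 1)

-- ===== PORT B =====
-- f(k) = 1 + k if dim == 1 else 1 + (dim**(k+1) - dim) // (dim - 1)
def pvCumCount (dim : Int) (k : Int) : Int :=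
  if dim = 1 then 1 + k
  else 1 + PySem.Int.floordiv (dim ^ (k + 1).toNat - dim) (dim - 1)

def algebra_level_calculator_alt (sublevel : Int) (dim : Int) (level : Int) : Int × Int :=
  let n := max sublevel 0
  (pvCumCount dim (n - 1), pvCumCount dim n)

-- ===== PRECONDITION & SPEC =====
-- A's assert raises AssertionError when sublevel > level; exactly those inputs are excluded.
def Pre_algebra_level_calculator (sublevel : Int) (dim : Int) (level : Int) : Prop :=
  sublevel ≤ level
instance (sublevel : Int) (dim : Int) (level : Int) : Decidable (Pre_algebra_level_calculator sublevel dim level) := by unfold Pre_algebra_level_calculator; infer_instance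
def pvWitness_algebra_level_calculator : Int × Int × Int := (2, 3, 5)

def Spec_algebra_level_calculator (sublevel : Int) (dim : Int) (level : Int) (out : Int × Int) : Prop := out = algebra_level_calculator_alt sublevel dim level
instance (sublevel : Int) (dim : Int) (level : Int) (out : Int × Int) : Decidable (Spec_algebra_level_calculator sublevel dim level out) := by unfold Spec_algebra_level_calculator; infer_instance

-- ===== CLAIM (what is proved, stated in full; the proofs are below) =====
def Claim_equal_algebra_level_calculator : Prop := ∀ (sublevel : Int) (dim : Int) (level : Int), Dom_algebra_level_calculator sublevel dim level → Pre_algebra_level_calculator sublevel dim level → Spec_algebra_level_calculator sublevel dim level (algebra_level_calculator sublevel dim level)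

-- ===== LEMMAS AND PROOFS =====

theorem pv_dvd_pow_sub (d : Int) (j : Nat) : (d - 1) ∣ d ^ j - d := by
  have h1 : (d - 1) ∣ d ^ j - 1 ^ j := sub_dvd_pow_sub_pow d 1 j
  simpa using (dvd_sub h1 (dvd_refl (d - 1)))

-- exact-division characterisation of the floordiv in pvCumCount
theorem pv_floordiv_exact (a b : Int) (h : b ∣ a) :
    PySem.Int.floordiv a b * b = a := by
  have hm : PySem.Int.mod a b = 0 := (PySem.Int.mod_eq_zero_iff_dvd a b).mpr h
  have := PySem.Int.floordiv_mul_add_mod a b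
  omega

theorem pv_floordiv_of_eq_mul (a b q : Int) (hb : b ≠ 0) (h : a = q * b) :
    PySem.Int.floordiv a b = q := by
  apply mul_right_cancel₀ (b := b) hb
  rw [pv_floordiv_exact a b ⟨q, by rw [h, mul_comm]⟩, h]

theorem pvCumCount_neg_one (d : Int) : pvCumCount d (-1) = 0 := by
  unfold pvCumCount
  by_cases hd : d = 1
  · simp [hd]
  · have hb : d - 1 ≠ 0 := by omega
    have : PySem.Int.floordiv (d ^ ((-1 : Int) + 1).toNat - d) (d - 1) = -1 :=
      pv_floordiv_of_eq_mul _ _ _ hb (by norm_num)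
    rw [if_neg hd, this]; ring

theorem pvCumCount_zero (d : Int) : pvCumCount d 0 = 1 := by
  unfold pvCumCount
  by_cases hd : d = 1
  · simp [hd]
  · have hb : d - 1 ≠ 0 := by omega
    have : PySem.Int.floordiv (d ^ ((0 : Int) + 1).toNat - d) (d - 1) = 0 :=
      pv_floordiv_of_eq_mul _ _ _ hb (by norm_num)
    rw [if_neg hd, this]; ring

theorem pvCumCount_step (d : Int) (n : Nat) :
    pvCumCount d (n : Int) + d ^ (n + 1) = pvCumCount d ((n : Int) + 1) := by
  unfold pvCumCount
  by_cases hd : d = 1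
  · simp [hd]; ring
  · have hb : d - 1 ≠ 0 := by omega
    have hn1 : ((n : Int) + 1).toNat = n + 1 := by omega
    have hn2 : ((n : Int) + 1 + 1).toNat = n + 2 := by omega
    rw [if_neg hd, if_neg hd, hn1, hn2]
    have h1 := pv_floordiv_exact (d ^ (n + 1) - d) (d - 1) (pv_dvd_pow_sub d (n + 1))
    have key : PySem.Int.floordiv (d ^ (n + 2) - d) (d - 1)
        = PySem.Int.floordiv (d ^ (n + 1) - d) (d - 1) + d ^ (n + 1) := by
      apply mul_right_cancel₀ (b := d - 1) hb
      rw [pv_floordiv_exact _ _ (pv_dvd_pow_sub d (n + 2)), add_mul, h1]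
      ring
    rw [key]; ring

-- the loop over range(1, n+1) computes the closed form
theorem pv_loop_eq (d : Int) (n : Nat) :
    (PySem.List.pyRange 1 ((n : Int) + 1) 1).foldl
      (fun (s : Int × Int) (i : Int) => (s.2, s.2 + d ^ i.toNat)) (0, 1)
    = (pvCumCount d ((n : Int) - 1), pvCumCount d (n : Int)) := by
  induction n with
  | zero =>
    rw [PySem.List.pyRange_one_eq_nil (by omega)]
    simp only [List.foldl, Nat.cast_zero, zero_sub]
    rw [pvCumCount_neg_one, pvCumCount_zero]
  | succ m ih =>
    have hsplit : PySem.List.pyRange 1 ((m : Int) + 1 + 1) 1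
        = PySem.List.pyRange 1 ((m : Int) + 1) 1 ++ [(m : Int) + 1] :=
      PySem.List.pyRange_one_succ_right (by omega)
    push_cast
    rw [hsplit, List.foldl_append, ih]
    simp only [List.foldl]
    have ht : ((m : Int) + 1).toNat = m + 1 := by omega
    have h1 : ((m : Int) + 1 - 1) = (m : Int) := by ring
    rw [ht, h1, ← pvCumCount_step d m]

-- ===== VERDICT (by name: the statement is the Claim_ definition above) =====
theorem algebra_level_calculator_spec : Claim_equal_algebra_level_calculator := by
  intro sublevel dim level _ _
  unfold Spec_algebra_level_calculator algebra_level_calculator algebra_level_calculator_alt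
  by_cases h : 0 ≤ sublevel
  · obtain ⟨n, hn⟩ := Int.eq_ofNat_of_zero_le h
    subst hn
    have hmax : max (n : Int) 0 = (n : Int) := by omega
    simp only [hmax]
    exact pv_loop_eq dim n
  · have hmax : max sublevel 0 = 0 := by omega
    rw [PySem.List.pyRange_one_eq_nil (by omega)]
    simp only [List.foldl, hmax, zero_sub]
    rw [pvCumCount_neg_one, pvCumCount_zero]
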